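-- pv_equiv track=rewrite | github.com/showgan/adyghe-latin-utils | src/adyghe_latin_utils/number_utils.py | _divide_to_triplets
-- ===== SOURCE A (Python) =====
-- def _divide_to_triplets(number_str: str) -> list:
--     triplets = []
--     i = len(number_str)
--     while i > 0:
--         start = max(0, i - 3)
--         triplet = number_str[start:i]
--         triplets.append(triplet)
--         i -= 3
--     return triplets
-- ===== SOURCE B (Python) =====
-- def _divide_to_triplets(number_str: str) -> list:
--     n = len(number_str)
--     first = n % 3
--     chunks = [number_str[:first]] if first > 0 else []
--     idx = first
--     while idx < n:
--         chunks.append(number_str[idx:idx + 3])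
--         idx += 3
--     return list(reversed(chunks))
-- ===== Notes on version B (the rewrite author's own statement) =====
-- stated objective: alternative
-- what changed: Replaces A's backward while-loop with max()-clamped slice starts by a forward pass: a modulo-computed leading group, full triplets left to right, and one final reversal.
import Mathlib
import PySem

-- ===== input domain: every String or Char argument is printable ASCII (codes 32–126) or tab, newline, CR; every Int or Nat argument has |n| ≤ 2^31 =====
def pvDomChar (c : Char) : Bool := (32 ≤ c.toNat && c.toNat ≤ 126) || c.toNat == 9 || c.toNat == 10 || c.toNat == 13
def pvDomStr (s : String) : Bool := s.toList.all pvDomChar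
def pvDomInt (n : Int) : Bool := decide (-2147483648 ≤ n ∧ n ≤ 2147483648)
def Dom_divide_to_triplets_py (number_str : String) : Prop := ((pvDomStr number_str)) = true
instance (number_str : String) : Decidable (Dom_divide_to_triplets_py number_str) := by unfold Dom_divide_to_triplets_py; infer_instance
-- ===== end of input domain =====

-- B replaces A's backward while-loop (max-clamped slice starts) by a forward pass with a
-- modulo-computed leading group and a final reversal; alternative decomposition, same cost.


-- ===== PORT A =====
-- while i > 0: start = max(0, i-3); triplets.append(number_str[start:i]); i -= 3
def pvAGo (cs : List Char) (i : Int) (acc : List String) : List String :=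
  if 0 < i then
    pvAGo cs (i - 3)
      (acc ++ [String.ofList (PySem.List.slice cs (some (max 0 (i - 3))) (some i))])
  else acc
termination_by i.toNat
decreasing_by omega

def divide_to_triplets_py (number_str : String) : List String :=
  pvAGo number_str.toList (number_str.toList.length : Int) []

-- ===== PORT B =====
-- while idx < n: chunks.append(number_str[idx:idx+3]); idx += 3
def pvBGo (cs : List Char) (idx n : Nat) (acc : List String) : List String :=
  if idx < n then
    pvBGo cs (idx + 3) n
      (acc ++ [String.ofList (PySem.List.slice cs (some (idx : Int)) (some ((idx : Int) + 3)))])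
  else acc
termination_by n - idx
decreasing_by omega

def divide_to_triplets_py_alt (number_str : String) : List String :=
  (pvBGo number_str.toList (number_str.toList.length % 3) number_str.toList.length
    (if 0 < number_str.toList.length % 3 then
      [String.ofList (PySem.List.slice number_str.toList none
        (some ((number_str.toList.length % 3 : Nat) : Int)))]
     else [])).reverse

-- ===== PRECONDITION & SPEC =====
def Spec_divide_to_triplets_py (number_str : String) (out : List String) : Prop := out = divide_to_triplets_py_alt number_str
instance (number_str : String) (out : List String) : Decidable (Spec_divide_to_triplets_py number_str out) := by unfold Spec_divide_to_triplets_py; infer_instance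

-- ===== CLAIM (what is proved, stated in full; the proofs are below) =====
def Claim_equal_divide_to_triplets_py : Prop := ∀ (number_str : String), Dom_divide_to_triplets_py number_str → Spec_divide_to_triplets_py number_str (divide_to_triplets_py number_str)

-- ===== LEMMAS AND PROOFS =====

/-- `String.ofList` of the characters of `cs` from `a` (inclusive) to `b` (exclusive). -/
def chunkS (cs : List Char) (a b : Nat) : String :=
  String.ofList ((cs.drop a).take (b - a))

/-- A's triplets, right to left, as a pure `Nat` recursion. -/
def revC (cs : List Char) (i : Nat) : List String :=
  if h : 0 < i then chunkS cs (i - 3) i :: revC cs (i - 3) else []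
termination_by i
decreasing_by omega

/-- B's full triplets, left to right. -/
def fwdC (cs : List Char) (i n : Nat) : List String :=
  if h : i < n then chunkS cs i (i + 3) :: fwdC cs (i + 3) n else []
termination_by n - i
decreasing_by omega

lemma pvAGo_eq (cs : List Char) :
    ∀ (i : Nat) (acc : List String), pvAGo cs (i : Int) acc = acc ++ revC cs i := by
  intro i
  induction i using Nat.strong_induction_on with
  | _ i ih =>
    intro acc
    rw [pvAGo, revC]
    by_cases h : 0 < i
    · simp only [h, dif_pos, (by exact_mod_cast h : (0:Int) < (i:Int)), dif_pos]
      by_cases h3 : 3 ≤ i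
      · have e1 : (i : Int) - 3 = ((i - 3 : Nat) : Int) := by omega
        have e2 : max 0 ((i : Int) - 3) = ((i - 3 : Nat) : Int) := by omega
        rw [e2, e1, ih (i - 3) (by omega)]
        have : PySem.List.slice cs (some ((i - 3 : Nat) : Int)) (some ((i : Nat) : Int))
            = (cs.drop (i - 3)).take (i - (i - 3)) := PySem.List.slice_natCast cs (i - 3) i
        simp [this, chunkS]
      · -- 0 < i < 3 : next i is nonpositive, the recursive call returns its accumulator
        have e2 : max 0 ((i : Int) - 3) = ((0 : Nat) : Int) := by omega
        rw [e2, pvAGo]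
        have hneg : ¬ (0 : Int) < (i : Int) - 3 := by omega
        simp only [hneg]
        have hz : i - 3 = 0 := by omega
        have hsl : PySem.List.slice cs (some ((0 : Nat) : Int)) (some ((i : Nat) : Int))
            = (cs.drop 0).take (i - 0) := PySem.List.slice_natCast cs 0 i
        rw [hz, revC]
        simp only [Nat.cast_zero] at hsl
        simp [hsl, chunkS]
    · have hneg : ¬ (0:Int) < (i:Int) := by omega
      simp [h]

lemma pvBGo_eq (cs : List Char) (n : Nat) :
    ∀ (k i : Nat), n ≤ i + k → ∀ acc, pvBGo cs i n acc = acc ++ fwdC cs i n := by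
  intro k
  induction k with
  | zero =>
    intro i hi acc
    rw [pvBGo, fwdC]
    have : ¬ i < n := by omega
    simp [this]
  | succ k ih =>
    intro i hi acc
    rw [pvBGo, fwdC]
    by_cases h : i < n
    · simp only [h, dif_pos]
      rw [ih (i + 3) (by omega)]
      have hsl : PySem.List.slice cs (some ((i : Nat) : Int)) (some (((i : Nat) : Int) + 3))
          = (cs.drop i).take ((i + 3) - i) := by
        have h0 := PySem.List.slice_natCast cs i (i + 3)
        push_cast at h0
        exact h0
      simp [hsl, chunkS]
    · simp [h]

lemma rev_fwd (cs : List Char) (n : Nat) :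
    ∀ (k i : Nat), n = i + 3 * k → revC cs n = (fwdC cs i n).reverse ++ revC cs i := by
  intro k
  induction k with
  | zero =>
    intro i hi
    rw [fwdC]
    have hni : ¬ i < n := by omega
    simp [hi]
  | succ k ih =>
    intro i hi
    have hlt : i < n := by omega
    have h3 : revC cs (i + 3) = chunkS cs i (i + 3) :: revC cs i := by
      rw [revC]
      have : 0 < i + 3 := by omega
      simp [this]
    rw [ih (i + 3) (by omega), h3]
    conv_rhs => rw [fwdC]
    simp [hlt]

theorem divide_to_triplets_py_spec_aux (number_str : String) :
    divide_to_triplets_py number_str = divide_to_triplets_py_alt number_str := by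
  unfold divide_to_triplets_py divide_to_triplets_py_alt
  set cs := number_str.toList with hcs
  set n := cs.length with hn
  rw [pvAGo_eq cs n [], pvBGo_eq cs n n (n % 3) (by omega) _]
  rw [rev_fwd cs n (n / 3) (n % 3) (by omega)]
  simp only [List.nil_append, List.reverse_append]
  congr 1
  by_cases h : 0 < n % 3
  · rw [revC]
    have hz : n % 3 - 3 = 0 := by omega
    simp only [h, dif_pos, hz]
    rw [revC]
    have hsl : PySem.List.slice cs none (some ((n % 3 : Nat) : Int)) = cs.take (n % 3) :=
      PySem.List.slice_to_natCast cs (n % 3)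
    push_cast at hsl
    simp [hsl, chunkS]
  · rw [revC]
    simp [h]

-- ===== VERDICT (by name: the statement is the Claim_ definition above) =====
theorem divide_to_triplets_py_spec : Claim_equal_divide_to_triplets_py := by
  intro s _
  exact divide_to_triplets_py_spec_aux s
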